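-- pv_equiv track=rewrite | github.com/DromadaireFache/SBB-cpu-Computer-sim.- | asm.py | num2byte
-- ===== SOURCE A (Python) =====
-- def num2byte(num: int) -> list[int]:
--     if num < 255:
--         return [num & 255]
--     bytes = []
--     while num > 255:
--         bytes.append(num & 255)
--         num >>= 8
--     bytes.append(num)
--     return bytes
-- ===== SOURCE B (Python) =====
-- def num2byte(num: int) -> list[int]:
--     # linear recursion on the byte recurrence; <= 255 unifies A's special cases
--     if num <= 255:
--         return [num & 255]
--     return [num & 255] + num2byte(num >> 8)
-- ===== Notes on version B (the rewrite author's own statement) =====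
-- stated objective: simpler
-- what changed: Replaced the branch-plus-while-loop-with-accumulator by a two-line linear recursion whose single <=255 base case subsumes A's <255 early return, the ==255 fall-through and the final raw append.
import Mathlib
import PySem

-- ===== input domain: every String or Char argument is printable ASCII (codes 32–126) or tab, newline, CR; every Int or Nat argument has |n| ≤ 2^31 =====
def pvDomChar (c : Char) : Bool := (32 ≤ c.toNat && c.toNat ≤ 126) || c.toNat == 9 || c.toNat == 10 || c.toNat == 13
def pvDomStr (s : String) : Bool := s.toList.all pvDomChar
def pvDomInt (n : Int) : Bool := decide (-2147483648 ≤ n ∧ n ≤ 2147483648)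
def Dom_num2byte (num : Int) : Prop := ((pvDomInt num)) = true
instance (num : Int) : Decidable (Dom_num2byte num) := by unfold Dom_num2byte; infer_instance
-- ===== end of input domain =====

-- B replaces A's branch + while loop with a two-line linear recursion (objective: simpler).

-- termination helper for both ports: shifting right by 8 shrinks a positive Int's toNat
theorem pvShiftLt (num : Int) (h : 255 < num) : (num >>> (8:Nat)).toNat < num.toNat := by
  rw [Int.shiftRight_eq_div_pow]
  omega

-- ===== PORT A =====
def num2byteLoop (num : Int) (bytes : List Int) : List Int :=
  if 255 < num then
    num2byteLoop (num >>> (8:Nat)) (bytes ++ [PySem.Int.band num 255])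
  else bytes ++ [num]
termination_by num.toNat
decreasing_by exact pvShiftLt num (by omega)

def num2byte (num : Int) : List Int :=
  if num < 255 then [PySem.Int.band num 255]
  else num2byteLoop num []

-- ===== PORT B =====
def num2byte_alt (num : Int) : List Int :=
  if num ≤ 255 then [PySem.Int.band num 255]
  else PySem.Int.band num 255 :: num2byte_alt (num >>> (8:Nat))
termination_by num.toNat
decreasing_by exact pvShiftLt num (by omega)

-- ===== PRECONDITION & SPEC =====
def Spec_num2byte (num : Int) (out : List Int) : Prop := out = num2byte_alt num
instance (num : Int) (out : List Int) : Decidable (Spec_num2byte num out) := by unfold Spec_num2byte; infer_instance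

-- ===== CLAIM (what is proved, stated in full; the proofs are below) =====
def Claim_equal_num2byte : Prop := ∀ (num : Int), Dom_num2byte num → Spec_num2byte num (num2byte num)

-- ===== LEMMAS AND PROOFS =====

-- x & 255 = x for bytes
theorem pvBandSelf (x : Int) (h0 : 0 ≤ x) (h1 : x < 256) : PySem.Int.band x 255 = x := by
  rw [PySem.Int.band_of_nonneg h0 (by norm_num)]
  have : x.toNat &&& (255:Int).toNat = x.toNat % 256 := Nat.and_two_pow_sub_one_eq_mod x.toNat 8
  rw [this]
  omega

theorem pvLoopEq (n : Nat) (num : Int) (bytes : List Int) (hn : num.toNat ≤ n) (h : 255 < num) :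
    num2byteLoop num bytes = bytes ++ num2byte_alt num := by
  induction n generalizing num bytes with
  | zero => omega
  | succ n ih =>
    rw [num2byteLoop, if_pos h, num2byte_alt, if_neg (by omega)]
    have hq : num >>> (8:Nat) = num / 256 := by
      rw [Int.shiftRight_eq_div_pow]; norm_num
    by_cases h2 : 255 < num >>> (8:Nat)
    · rw [ih (num >>> (8:Nat)) _ (by have := pvShiftLt num h; omega) h2]
      simp
    · rw [num2byteLoop, if_neg h2, num2byte_alt, if_pos (by omega)]
      rw [pvBandSelf (num >>> (8:Nat)) (by rw [hq]; positivity) (by omega)]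
      simp

-- ===== VERDICT (by name: the statement is the Claim_ definition above) =====
theorem num2byte_spec : Claim_equal_num2byte := by
  intro num _
  unfold Spec_num2byte num2byte
  by_cases h : num < 255
  · rw [if_pos h, num2byte_alt, if_pos (by omega)]
  · rw [if_neg h]
    by_cases h255 : num = 255
    · subst h255
      rw [num2byteLoop, if_neg (by omega), num2byte_alt, if_pos (by omega),
        pvBandSelf 255 (by omega) (by omega)]
      simp
    · rw [pvLoopEq num.toNat num [] le_rfl (by omega)]
      simp
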